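-- pv_equiv track=rewrite | github.com/abinavChandar/demo_env_l4 | dsl_primitives.py | dsl_component_mask
-- ===== SOURCE A (Python) =====
-- from typing import List, Tuple, Dict, Iterable, Optional
--
-- Grid = List[List[int]]
--
-- def dsl_shape(G: Grid) -> Tuple[int, int]:
--     return (len(G), len(G[0]) if G and G[0] is not None else 0)
--
-- def dsl_clamp(x: int) -> int:
--     # ARC colors are 0..9
--     if x < 0: return 0
--     if x > 9: return 9
--     return x
--
-- def dsl_zeros_like(G: Grid, val: int = 0) -> Grid:
--     H, W = dsl_shape(G)
--     return [[dsl_clamp(val) for _ in range(W)] for _ in range(H)]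
--
-- def dsl_in_bounds(G: Grid, r: int, c: int) -> bool:
--     H, W = dsl_shape(G)
--     return 0 <= r < H and 0 <= c < W
--
-- def dsl_neighbors4(r: int, c: int) -> Iterable[Tuple[int,int]]:
--     yield r-1, c
--     yield r+1, c
--     yield r, c-1
--     yield r, c+1
--
-- def dsl_component_mask(G: Grid, r: int, c: int) -> Grid:
--     # returns 0/1 mask of the 4-connected component at (r,c)
--     if not dsl_in_bounds(G, r, c): return dsl_zeros_like(G, 0)
--     target = G[r][c]
--     H, W = dsl_shape(G)
--     seen = [[0]*W for _ in range(H)]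
--     stack = [(r,c)]
--     seen[r][c] = 1
--     while stack:
--         rr, cc = stack.pop()
--         for nr, nc in dsl_neighbors4(rr, cc):
--             if dsl_in_bounds(G, nr, nc) and not seen[nr][nc] and G[nr][nc] == target:
--                 seen[nr][nc] = 1
--                 stack.append((nr, nc))
--     return seen
-- ===== SOURCE B (Python) =====
-- def dsl_component_mask(G, r, c):
--     # Frontier-level BFS saturation: expand the component set level by level
--     # (at most H*W rounds), then render the 0/1 mask in one pass.
--     H = len(G)
--     W = len(G[0]) if G and G[0] is not None else 0
--     if not (0 <= r < H and 0 <= c < W):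
--         return [[0] * W for _ in range(H)]
--     target = G[r][c]
--     comp = {(r, c)}
--     frontier = [(r, c)]
--     for _ in range(H * W):
--         if not frontier:
--             break
--         new = []
--         for (x, y) in frontier:
--             for (i, j) in ((x - 1, y), (x + 1, y), (x, y - 1), (x, y + 1)):
--                 if 0 <= i < H and 0 <= j < W and (i, j) not in comp and G[i][j] == target:
--                     comp.add((i, j))
--                     new.append((i, j))
--         frontier = new
--     return [[1 if (i, j) in comp else 0 for j in range(W)] for i in range(H)]
-- ===== Notes on version B (the rewrite author's own statement) =====
-- stated objective: alternative
-- what changed: Replaces the mark-on-push stack DFS over a seen-matrix by a frontier-level BFS saturation (component set plus per-round frontier list, bounded by H*W rounds) followed by a single rendering pass that builds the 0/1 mask from set membership.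
-- outside the precondition, e.g. on dsl_component_mask([[1, 2], [3]], 0, 0): A returns [[1, 0], [0, 0]], B returns [[1, 0], [0, 0]]
import Mathlib
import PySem

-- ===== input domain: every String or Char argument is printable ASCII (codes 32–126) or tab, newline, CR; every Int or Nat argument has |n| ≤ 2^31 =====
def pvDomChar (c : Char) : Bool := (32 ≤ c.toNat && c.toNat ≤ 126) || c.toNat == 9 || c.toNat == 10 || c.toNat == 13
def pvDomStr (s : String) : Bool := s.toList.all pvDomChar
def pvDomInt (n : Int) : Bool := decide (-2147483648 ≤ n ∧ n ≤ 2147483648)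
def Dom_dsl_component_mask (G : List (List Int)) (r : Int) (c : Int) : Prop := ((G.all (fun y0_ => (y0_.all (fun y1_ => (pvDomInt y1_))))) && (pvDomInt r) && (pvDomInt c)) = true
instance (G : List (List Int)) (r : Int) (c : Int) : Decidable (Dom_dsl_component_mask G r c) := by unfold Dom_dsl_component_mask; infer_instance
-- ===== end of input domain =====

-- B replaces A's stack DFS over a seen-matrix by a frontier-level BFS saturation with a
-- component set, then renders the 0/1 mask in one pass (alternative decomposition, same cost).


-- ===== PORT A =====
-- helpers mirror the module's helpers (dsl_shape, dsl_clamp, dsl_in_bounds, dsl_neighbors4)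
def pvShape (G : List (List Int)) : Int × Int :=
  ((G.length : Int), match G with | [] => 0 | g0 :: _ => (g0.length : Int))

def pvClamp (x : Int) : Int := if x < 0 then 0 else if x > 9 then 9 else x

def pvInBounds (G : List (List Int)) (r c : Int) : Bool :=
  decide (0 ≤ r ∧ r < (pvShape G).1 ∧ 0 ≤ c ∧ c < (pvShape G).2)

def pvNeighbors4 (r c : Int) : List (Int × Int) := [(r-1, c), (r+1, c), (r, c-1), (r, c+1)]

-- G[i][j] for 0 ≤ i, 0 ≤ j established by pvInBounds; exact under Pre_ (every row ≥ first-row width)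
def pvGridGet (g : List (List Int)) (p : Int × Int) : Int :=
  (g.getD p.1.toNat []).getD p.2.toNat 0

def pvGridSet1 (g : List (List Int)) (p : Int × Int) : List (List Int) :=
  g.set p.1.toNat ((g.getD p.1.toNat []).set p.2.toNat 1)

-- the while loop: pop the top of the stack, mark-and-push the unseen equal-colored neighbors
-- (fuel bounds the iteration count; 2*H*W+2 is proved sufficient below; `not seen[nr][nc]`
-- is `= 0` since seen entries are 0/1)
def pvDfsLoop (G : List (List Int)) (t : Int) :
    Nat → List (List Int) → List (Int × Int) → List (List Int)
  | 0, seen, _ => seen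
  | _ + 1, seen, [] => seen
  | fuel + 1, seen, p :: rest =>
      let st := (pvNeighbors4 p.1 p.2).foldl
        (fun (st : List (List Int) × List (Int × Int)) q =>
          if pvInBounds G q.1 q.2 ∧ pvGridGet st.1 q = 0 ∧ pvGridGet G q = t
          then (pvGridSet1 st.1 q, q :: st.2) else st)
        (seen, rest)
      pvDfsLoop G t fuel st.1 st.2

def dsl_component_mask (G : List (List Int)) (r : Int) (c : Int) : List (List Int) :=
  if pvInBounds G r c then
    let t := pvGridGet G (r, c)
    let H := (pvShape G).1
    let W := (pvShape G).2
    let seen0 := (List.range H.toNat).map (fun _ => List.replicate W.toNat (0 : Int))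
    pvDfsLoop G t (2 * (H.toNat * W.toNat) + 2) (pvGridSet1 seen0 (r, c)) [(r, c)]
  else
    -- dsl_zeros_like G 0
    (List.range (pvShape G).1.toNat).map
      (fun _ => (List.range (pvShape G).2.toNat).map (fun _ => pvClamp 0))

-- ===== PORT B =====
-- frontier-level BFS saturation (comp : set, frontier : list), at most H*W rounds, then render
def pvBfsRound (G : List (List Int)) (t H W : Int)
    (st : PySem.Set (Int × Int) × List (Int × Int)) :
    PySem.Set (Int × Int) × List (Int × Int) :=
  if st.2.isEmpty then st  -- `if not frontier: break` (remaining rounds are no-ops)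
  else st.2.foldl
    (fun st2 p =>
      [(p.1 - 1, p.2), (p.1 + 1, p.2), (p.1, p.2 - 1), (p.1, p.2 + 1)].foldl
        (fun (st3 : PySem.Set (Int × Int) × List (Int × Int)) q =>
          if (0 ≤ q.1 ∧ q.1 < H ∧ 0 ≤ q.2 ∧ q.2 < W) ∧ ¬ q ∈ st3.1 ∧
              (G.getD q.1.toNat []).getD q.2.toNat 0 = t
          then (PySem.Set.add st3.1 q, st3.2 ++ [q]) else st3)
        st2)
    (st.1, ([] : List (Int × Int)))

def dsl_component_mask_alt (G : List (List Int)) (r : Int) (c : Int) : List (List Int) :=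
  let H : Int := (G.length : Int)
  let W : Int := match G with | [] => 0 | g0 :: _ => (g0.length : Int)
  if 0 ≤ r ∧ r < H ∧ 0 ≤ c ∧ c < W then
    let target := (G.getD r.toNat []).getD c.toNat 0
    let fin := (List.range (H.toNat * W.toNat)).foldl
      (fun st _ => pvBfsRound G target H W st) (([(r, c)] : PySem.Set (Int × Int)), [(r, c)])
    (List.range H.toNat).map (fun (i : Nat) =>
      (List.range W.toNat).map (fun (j : Nat) =>
        if ((i : Int), (j : Int)) ∈ fin.1 then (1 : Int) else 0))
  else
    (List.range H.toNat).map (fun _ => List.replicate W.toNat (0 : Int))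

-- ===== PRECONDITION & SPEC =====
-- Pre_ excludes in-bounds queries on ragged grids having a row shorter than the first row:
-- there A's lookup G[nr][nc] (nc < len(G[0])) can raise IndexError (whether it does depends
-- on which cells the flood fill reaches); out-of-bounds queries never touch the rows and stay in.
def Pre_dsl_component_mask (G : List (List Int)) (r : Int) (c : Int) : Prop :=
  (¬ (0 ≤ r ∧ r < (G.length : Int) ∧ 0 ≤ c ∧ c < ((G.headD []).length : Int))) ∨
    ∀ row ∈ G, (G.headD []).length ≤ row.length

instance (G : List (List Int)) (r : Int) (c : Int) : Decidable (Pre_dsl_component_mask G r c) := by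
  unfold Pre_dsl_component_mask; infer_instance

def pvWitness_dsl_component_mask : List (List Int) × Int × Int := ([[1, 1], [0, 1]], 0, 0)

def Spec_dsl_component_mask (G : List (List Int)) (r : Int) (c : Int) (out : List (List Int)) : Prop :=
  out = dsl_component_mask_alt G r c

instance (G : List (List Int)) (r : Int) (c : Int) (out : List (List Int)) :
    Decidable (Spec_dsl_component_mask G r c out) := by
  unfold Spec_dsl_component_mask; infer_instance

-- ===== CLAIM =====
def Claim_equal_dsl_component_mask : Prop :=
  ∀ (G : List (List Int)) (r : Int) (c : Int), Dom_dsl_component_mask G r c →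
    Pre_dsl_component_mask G r c →
    Spec_dsl_component_mask G r c (dsl_component_mask G r c)

-- ===== LEMMAS AND PROOFS =====

-- proof-side abbreviations
def pvWd (G : List (List Int)) : Nat := match G with | [] => 0 | g0 :: _ => g0.length

theorem pvShape_eq (G : List (List Int)) : pvShape G = ((G.length : Int), (pvWd G : Int)) := by
  cases G <;> rfl

theorem pvInBounds_iff (G : List (List Int)) (a b : Int) :
    pvInBounds G a b = true ↔
      (0 ≤ a ∧ a < (G.length : Int) ∧ 0 ≤ b ∧ b < (pvWd G : Int)) := by
  simp [pvInBounds, pvShape_eq]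

-- eligibility: in bounds and of the target color
def pvElig (G : List (List Int)) (t : Int) (q : Int × Int) : Bool :=
  pvInBounds G q.1 q.2 && decide (pvGridGet G q = t)

-- the cell rectangle as a Finset
def pvCells (G : List (List Int)) : Finset (Int × Int) :=
  ((Finset.range G.length) ×ˢ (Finset.range (pvWd G))).image (fun p => ((p.1 : Int), (p.2 : Int)))

theorem pvMem_cells (G : List (List Int)) (p : Int × Int) :
    p ∈ pvCells G ↔ pvInBounds G p.1 p.2 = true := by
  rw [pvInBounds_iff]
  simp only [pvCells, Finset.mem_image, Finset.mem_product, Finset.mem_range, Prod.ext_iff]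
  constructor
  · rintro ⟨⟨a, b⟩, ⟨ha, hb⟩, h1, h2⟩
    simp only at h1 h2
    omega
  · rintro ⟨h1, h2, h3, h4⟩
    exact ⟨(p.1.toNat, p.2.toNat), ⟨by omega, by omega⟩, by simp; omega, by simp; omega⟩

theorem pvCard_cells (G : List (List Int)) : (pvCells G).card = G.length * pvWd G := by
  have hinj : Function.Injective (fun p : Nat × Nat => ((p.1 : Int), (p.2 : Int))) := by
    intro a b h
    simp only [Prod.ext_iff] at h ⊢
    omega
  rw [pvCells, Finset.card_image_of_injective _ hinj, Finset.card_product,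
    Finset.card_range, Finset.card_range]

theorem pvIter_stab {α : Type} (f : α → α) {k : Nat} {S : α} (h : f^[k + 1] S = f^[k] S) :
    f^[k + 2] S = f^[k + 1] S := by
  rw [Function.iterate_succ_apply', h, ← Function.iterate_succ_apply' f k S]
  exact h

-- one saturation step
def pvFset (G : List (List Int)) (t : Int) (S : Finset (Int × Int)) : Finset (Int × Int) :=
  S ∪ S.biUnion (fun p => ((pvNeighbors4 p.1 p.2).filter (fun q => pvElig G t q)).toFinset)

theorem pvMem_F (G : List (List Int)) (t : Int) (S : Finset (Int × Int)) (q : Int × Int) :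
    q ∈ pvFset G t S ↔ q ∈ S ∨ ∃ p ∈ S, q ∈ pvNeighbors4 p.1 p.2 ∧ pvElig G t q = true := by
  simp [pvFset]

theorem pvF_infl (G : List (List Int)) (t : Int) (S : Finset (Int × Int)) : S ⊆ pvFset G t S :=
  Finset.subset_union_left

theorem pvF_sub_cells (G : List (List Int)) (t : Int) {S : Finset (Int × Int)}
    (h : S ⊆ pvCells G) : pvFset G t S ⊆ pvCells G := by
  intro q hq
  rw [pvMem_F] at hq
  rcases hq with hq | ⟨p, hp, hn, he⟩
  · exact h hq
  · rw [pvMem_cells]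
    simp only [pvElig, Bool.and_eq_true] at he
    exact he.1

theorem pvIter_sub_cells (G : List (List Int)) (t : Int) {S : Finset (Int × Int)}
    (h : S ⊆ pvCells G) (k : Nat) : (pvFset G t)^[k] S ⊆ pvCells G := by
  induction k with
  | zero => exact h
  | succ k ih =>
      rw [Function.iterate_succ_apply']
      exact pvF_sub_cells G t ih

theorem pvIter_fix (G : List (List Int)) (t : Int) {S : Finset (Int × Int)}
    (hS : S ⊆ pvCells G) (hne : S.Nonempty) :
    pvFset G t ((pvFset G t)^[G.length * pvWd G] S) = (pvFset G t)^[G.length * pvWd G] S := by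
  have aux : ∀ k : Nat, (pvFset G t)^[k + 1] S = (pvFset G t)^[k] S ∨
      S.card + k ≤ ((pvFset G t)^[k] S).card := by
    intro k
    induction k with
    | zero => exact Or.inr (by simp)
    | succ k ih =>
        rcases ih with h | h
        · left
          exact pvIter_stab _ h
        · by_cases heq : (pvFset G t)^[k + 1] S = (pvFset G t)^[k] S
          · left
            exact pvIter_stab _ heq
          · right
            have hsub : (pvFset G t)^[k] S ⊆ (pvFset G t)^[k + 1] S := by
              rw [Function.iterate_succ_apply']
              exact pvF_infl G t _
            have hlt : ((pvFset G t)^[k] S).card < ((pvFset G t)^[k + 1] S).card :=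
              Finset.card_lt_card (Finset.ssubset_iff_subset_ne.2 ⟨hsub, fun h' => heq h'.symm⟩)
            omega
  rcases aux (G.length * pvWd G) with h | h
  · exact (Function.iterate_succ_apply' (pvFset G t) _ S).symm.trans h
  · exfalso
    have h1 : ((pvFset G t)^[G.length * pvWd G] S).card ≤ (pvCells G).card :=
      Finset.card_le_card (pvIter_sub_cells G t hS _)
    rw [pvCard_cells] at h1
    have h2 : 1 ≤ S.card := Finset.card_pos.2 hne
    omega

theorem pvIter_sub_closed (G : List (List Int)) (t : Int) (s0 : Int × Int)
    (T : Finset (Int × Int)) (h0 : s0 ∈ T)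
    (hcl : ∀ p ∈ T, ∀ q ∈ pvNeighbors4 p.1 p.2, pvElig G t q = true → q ∈ T) (k : Nat) :
    (pvFset G t)^[k] {s0} ⊆ T := by
  induction k with
  | zero => simpa using h0
  | succ k ih =>
      rw [Function.iterate_succ_apply']
      intro q hq
      rw [pvMem_F] at hq
      rcases hq with hq | ⟨p, hp, hn, he⟩
      · exact ih hq
      · exact hcl p (ih hp) q hn he

-- ===== A-side: the seen-grid as a marked cell set =====

def pvGInv (G s : List (List Int)) : Prop :=
  s.length = G.length ∧ ∀ row ∈ s, row.length = pvWd G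

def pvE01 (s : List (List Int)) : Prop := ∀ row ∈ s, ∀ x ∈ row, x = 0 ∨ x = 1

def pvM (G s : List (List Int)) : Finset (Int × Int) :=
  (pvCells G).filter (fun p => pvGridGet s p = 1)

theorem pvCells_coords {G : List (List Int)} {p : Int × Int} (hp : p ∈ pvCells G) :
    0 ≤ p.1 ∧ p.1.toNat < G.length ∧ 0 ≤ p.2 ∧ p.2.toNat < pvWd G := by
  rw [pvMem_cells, pvInBounds_iff] at hp
  omega

theorem pvMem_M {G s : List (List Int)} {p : Int × Int} :
    p ∈ pvM G s ↔ p ∈ pvCells G ∧ pvGridGet s p = 1 := Finset.mem_filter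

theorem pvM_sub_cells (G s : List (List Int)) : pvM G s ⊆ pvCells G :=
  Finset.filter_subset _ _

theorem pvGrid_get_set1 {G s : List (List Int)} (hs : pvGInv G s) {p q : Int × Int}
    (hp : p ∈ pvCells G) (hq : q ∈ pvCells G) :
    pvGridGet (pvGridSet1 s q) p = if p = q then 1 else pvGridGet s p := by
  obtain ⟨hp1, hp2, hp3, hp4⟩ := pvCells_coords hp
  obtain ⟨hq1, hq2, hq3, hq4⟩ := pvCells_coords hq
  have hql : q.1.toNat < s.length := by rw [hs.1]; exact hq2
  have hpl : p.1.toNat < s.length := by rw [hs.1]; exact hp2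
  have hrowq : (s.getD q.1.toNat []).length = pvWd G := by
    rw [List.getD_eq_getElem _ _ hql]
    exact hs.2 _ (List.getElem_mem hql)
  have hrowp : (s.getD p.1.toNat []).length = pvWd G := by
    rw [List.getD_eq_getElem _ _ hpl]
    exact hs.2 _ (List.getElem_mem hpl)
  have hpq : p = q ↔ (p.1.toNat = q.1.toNat ∧ p.2.toNat = q.2.toNat) := by
    rw [Prod.ext_iff]; omega
  have hpl' : p.1.toNat < (s.set q.1.toNat ((s.getD q.1.toNat []).set q.2.toNat 1)).length := by
    rw [List.length_set]; exact hpl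
  unfold pvGridGet pvGridSet1
  rw [List.getD_eq_getElem _ _ hpl', List.getElem_set]
  by_cases hij : q.1.toNat = p.1.toNat
  · rw [if_pos hij]
    have hj2 : p.2.toNat < ((s.getD q.1.toNat []).set q.2.toNat 1).length := by
      rw [List.length_set, hrowq]; exact hp4
    rw [List.getD_eq_getElem _ _ hj2, List.getElem_set]
    by_cases hjj : q.2.toNat = p.2.toNat
    · rw [if_pos hjj, if_pos (hpq.2 ⟨hij.symm, hjj.symm⟩)]
    · rw [if_neg hjj, if_neg (fun h => hjj (hpq.1 h).2.symm)]
      rw [List.getD_eq_getElem _ _ (show p.2.toNat < (s.getD p.1.toNat []).length by omega)]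
      simp [hij]
  · rw [if_neg hij, if_neg (fun h => hij (hpq.1 h).1.symm)]
    rw [List.getD_eq_getElem _ _ hpl]

theorem pvGInv_set1 {G s : List (List Int)} (hs : pvGInv G s) {q : Int × Int}
    (hlt : q.1.toNat < s.length) : pvGInv G (pvGridSet1 s q) := by
  constructor
  · simpa [pvGridSet1] using hs.1
  · intro row hrow
    rcases List.mem_or_eq_of_mem_set hrow with h | h
    · exact hs.2 row h
    · subst h
      rw [List.length_set, List.getD_eq_getElem _ _ hlt]
      exact hs.2 _ (List.getElem_mem hlt)

theorem pvE01_set1 {s : List (List Int)} (hs : pvE01 s) {q : Int × Int}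
    (hlt : q.1.toNat < s.length) : pvE01 (pvGridSet1 s q) := by
  intro row hrow x hx
  rcases List.mem_or_eq_of_mem_set hrow with h | h
  · exact hs row h x hx
  · subst h
    rcases List.mem_or_eq_of_mem_set hx with h2 | h2
    · rw [List.getD_eq_getElem _ _ hlt] at h2
      exact hs _ (List.getElem_mem hlt) x h2
    · exact Or.inr h2

theorem pvGet01 {G s : List (List Int)} (hs : pvGInv G s) (h01 : pvE01 s) {q : Int × Int}
    (hq : q ∈ pvCells G) : pvGridGet s q = 0 ∨ pvGridGet s q = 1 := by
  obtain ⟨hq1, hq2, hq3, hq4⟩ := pvCells_coords hq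
  have hql : q.1.toNat < s.length := by rw [hs.1]; exact hq2
  have hrow2 : q.2.toNat < (s[q.1.toNat]'hql).length := by
    rw [hs.2 _ (List.getElem_mem hql)]; exact hq4
  unfold pvGridGet
  rw [List.getD_eq_getElem _ _ hql, List.getD_eq_getElem _ _ hrow2]
  exact h01 _ (List.getElem_mem hql) _ (List.getElem_mem hrow2)

theorem pvM_set1 {G s : List (List Int)} (hs : pvGInv G s) {q : Int × Int}
    (hq : q ∈ pvCells G) : pvM G (pvGridSet1 s q) = insert q (pvM G s) := by
  ext p
  by_cases hp : p ∈ pvCells G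
  · simp only [pvMem_M, Finset.mem_insert]
    rw [pvGrid_get_set1 hs hp hq]
    by_cases hpq : p = q
    · simp [hpq, hq]
    · simp [hpq, hp]
  · have hpq : p ≠ q := fun h => hp (h ▸ hq)
    simp [pvMem_M, hp, hpq]

-- ===== A-side: the DFS loop =====

def pvAStep (G : List (List Int)) (t : Int)
    (st : List (List Int) × List (Int × Int)) (q : Int × Int) :
    List (List Int) × List (Int × Int) :=
  if pvInBounds G q.1 q.2 ∧ pvGridGet st.1 q = 0 ∧ pvGridGet G q = t
  then (pvGridSet1 st.1 q, q :: st.2) else st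

theorem pvDfsLoop_nil (G : List (List Int)) (t : Int) (fuel : Nat) (s : List (List Int)) :
    pvDfsLoop G t (fuel + 1) s [] = s := rfl

theorem pvDfsLoop_cons (G : List (List Int)) (t : Int) (fuel : Nat) (s : List (List Int))
    (p : Int × Int) (rest : List (Int × Int)) :
    pvDfsLoop G t (fuel + 1) s (p :: rest) =
      pvDfsLoop G t fuel ((pvNeighbors4 p.1 p.2).foldl (pvAStep G t) (s, rest)).1
        ((pvNeighbors4 p.1 p.2).foldl (pvAStep G t) (s, rest)).2 := rfl

theorem pvAStep_eq (G : List (List Int)) (t : Int) (s : List (List Int))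
    (stk : List (Int × Int)) (q : Int × Int) :
    pvAStep G t (s, stk) q =
      if pvElig G t q = true ∧ pvGridGet s q = 0 then (pvGridSet1 s q, q :: stk) else (s, stk) := by
  simp only [pvAStep, pvElig, Bool.and_eq_true, decide_eq_true_eq]
  split_ifs with h1 h2 <;> first | rfl | (exfalso; tauto)

theorem pvFoldA (G : List (List Int)) (t : Int) :
    ∀ (nl : List (Int × Int)) (s : List (List Int)) (stk : List (Int × Int)),
      pvGInv G s → pvE01 s → (∀ q ∈ nl, pvElig G t q = true → q ∈ pvCells G) →
      pvGInv G ((nl.foldl (pvAStep G t) (s, stk)).1) ∧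
      pvE01 ((nl.foldl (pvAStep G t) (s, stk)).1) ∧
      pvM G ((nl.foldl (pvAStep G t) (s, stk)).1)
        = pvM G s ∪ (nl.filter (fun q => pvElig G t q)).toFinset ∧
      (∀ x ∈ stk, x ∈ (nl.foldl (pvAStep G t) (s, stk)).2) ∧
      (∀ x ∈ (nl.foldl (pvAStep G t) (s, stk)).2, x ∈ stk ∨ (x ∈ nl ∧ pvElig G t x = true)) ∧
      (∀ q ∈ nl, pvElig G t q = true → q ∈ pvM G s ∨ q ∈ (nl.foldl (pvAStep G t) (s, stk)).2) ∧
      (pvM G ((nl.foldl (pvAStep G t) (s, stk)).1)).card + stk.length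
        = (pvM G s).card + ((nl.foldl (pvAStep G t) (s, stk)).2).length := by
  intro nl
  induction nl with
  | nil =>
      intro s stk hg h01 _
      refine ⟨hg, h01, by simp, by simp, by simp, by simp, by simp⟩
  | cons q nl' ih =>
      intro s stk hg h01 hcells
      have hqcells : pvElig G t q = true → q ∈ pvCells G := hcells q (by simp)
      have hcells' : ∀ x ∈ nl', pvElig G t x = true → x ∈ pvCells G :=
        fun x hx => hcells x (by simp [hx])
      simp only [List.foldl_cons, pvAStep_eq]
      by_cases hel : pvElig G t q = true
      · by_cases hz : pvGridGet s q = 0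
        · rw [if_pos ⟨hel, hz⟩]
          have hqc := hqcells hel
          have hqM : q ∉ pvM G s := by
            rw [pvMem_M]
            rintro ⟨-, h⟩
            omega
          have hM1 : pvM G (pvGridSet1 s q) = insert q (pvM G s) := pvM_set1 hg hqc
          have hltq : q.1.toNat < s.length := by
            rw [hg.1]; exact (pvCells_coords hqc).2.1
          obtain ⟨c1, c2, c3, c4, c5, c6, c7⟩ :=
            ih (pvGridSet1 s q) (q :: stk) (pvGInv_set1 hg hltq) (pvE01_set1 h01 hltq) hcells'
          have hqfin : q ∈ (nl'.foldl (pvAStep G t) (pvGridSet1 s q, q :: stk)).2 :=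
            c4 q (by simp)
          refine ⟨c1, c2, ?_, ?_, ?_, ?_, ?_⟩
          · rw [c3, hM1, List.filter_cons_of_pos (by simpa using hel)]
            simp only [List.toFinset_cons]
            rw [Finset.union_insert, Finset.insert_union]
          · intro x hx
            exact c4 x (by simp [hx])
          · intro x hx
            rcases c5 x hx with h | ⟨h1, h2⟩
            · rcases List.mem_cons.1 h with h | h
              · exact Or.inr ⟨by simp [h], h ▸ hel⟩
              · exact Or.inl h
            · exact Or.inr ⟨by simp [h1], h2⟩
          · intro x hx hxe
            rcases List.mem_cons.1 hx with h | h
            · exact Or.inr (h ▸ hqfin)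
            · rcases c6 x h hxe with h2 | h2
              · rw [hM1, Finset.mem_insert] at h2
                rcases h2 with h2 | h2
                · exact Or.inr (h2 ▸ hqfin)
                · exact Or.inl h2
              · exact Or.inr h2
          · have : (pvM G (pvGridSet1 s q)).card = (pvM G s).card + 1 := by
              rw [hM1, Finset.card_insert_of_notMem hqM]
            simp only [List.length_cons] at c7 ⊢
            omega
        · rw [if_neg (fun h => hz h.2)]
          have hqc := hqcells hel
          have hq1 : pvGridGet s q = 1 := by
            rcases pvGet01 hg h01 hqc with h | h
            · exact absurd h hz
            · exact h
          have hqM : q ∈ pvM G s := pvMem_M.2 ⟨hqc, hq1⟩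
          obtain ⟨c1, c2, c3, c4, c5, c6, c7⟩ := ih s stk hg h01 hcells'
          refine ⟨c1, c2, ?_, c4, ?_, ?_, c7⟩
          · rw [c3, List.filter_cons_of_pos (by simpa using hel)]
            simp only [List.toFinset_cons]
            rw [Finset.union_insert, Finset.insert_eq_self.2 (Finset.mem_union_left _ hqM)]
          · intro x hx
            rcases c5 x hx with h | ⟨h1, h2⟩
            · exact Or.inl h
            · exact Or.inr ⟨by simp [h1], h2⟩
          · intro x hx hxe
            rcases List.mem_cons.1 hx with h | h
            · exact Or.inl (h ▸ hqM)
            · rcases c6 x h hxe with h2 | h2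
              · exact Or.inl h2
              · exact Or.inr h2
      · rw [if_neg (fun h => hel h.1)]
        obtain ⟨c1, c2, c3, c4, c5, c6, c7⟩ := ih s stk hg h01 hcells'
        refine ⟨c1, c2, ?_, c4, ?_, ?_, c7⟩
        · rw [c3, List.filter_cons_of_neg (by simpa using hel)]
        · intro x hx
          rcases c5 x hx with h | ⟨h1, h2⟩
          · exact Or.inl h
          · exact Or.inr ⟨by simp [h1], h2⟩
        · intro x hx hxe
          rcases List.mem_cons.1 hx with h | h
          · exact absurd (h ▸ hxe) (by simpa using hel)
          · rcases c6 x h hxe with h2 | h2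
            · exact Or.inl h2
            · exact Or.inr h2

theorem pvDfsRun (G : List (List Int)) (t : Int) (R : Finset (Int × Int)) (s0 : Int × Int)
    (hfix : pvFset G t R = R)
    (hRsub : ∀ T : Finset (Int × Int), s0 ∈ T →
      (∀ p ∈ T, ∀ q ∈ pvNeighbors4 p.1 p.2, pvElig G t q = true → q ∈ T) → R ⊆ T) :
    ∀ (fuel : Nat) (s : List (List Int)) (stk : List (Int × Int)),
      pvGInv G s → pvE01 s → s0 ∈ pvM G s → pvM G s ⊆ R → (∀ p ∈ stk, p ∈ pvM G s) →
      (∀ p ∈ pvM G s, p ∉ stk → ∀ q ∈ pvNeighbors4 p.1 p.2, pvElig G t q = true → q ∈ pvM G s) →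
      2 * (G.length * pvWd G - (pvM G s).card) + stk.length < fuel →
      pvGInv G (pvDfsLoop G t fuel s stk) ∧ pvE01 (pvDfsLoop G t fuel s stk) ∧
        pvM G (pvDfsLoop G t fuel s stk) = R := by
  intro fuel
  induction fuel with
  | zero => intro s stk _ _ _ _ _ _ hm; omega
  | succ fuel ih =>
      intro s stk hg h01 hs0 hMR hstk hcl hm
      cases stk with
      | nil =>
          rw [pvDfsLoop_nil]
          refine ⟨hg, h01, Finset.Subset.antisymm hMR (hRsub _ hs0 ?_)⟩
          exact fun p hp => hcl p hp (by simp)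
      | cons p rest =>
          rw [pvDfsLoop_cons]
          have hp : p ∈ pvM G s := hstk p (by simp)
          have hnl : ∀ q ∈ pvNeighbors4 p.1 p.2, pvElig G t q = true → q ∈ R := by
            intro q hqn hqe
            rw [← hfix, pvMem_F]
            exact Or.inr ⟨p, hMR hp, hqn, hqe⟩
          obtain ⟨c1, c2, c3, c4, c5, c6, c7⟩ :=
            pvFoldA G t (pvNeighbors4 p.1 p.2) s rest hg h01
              (fun q hq hqe => (pvMem_cells G q).2 (by
                simp only [pvElig, Bool.and_eq_true] at hqe
                exact hqe.1))
          have hMsub : pvM G ((pvNeighbors4 p.1 p.2).foldl (pvAStep G t) (s, rest)).1 ⊆ R := by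
            rw [c3]
            refine Finset.union_subset hMR ?_
            intro x hx
            rw [List.mem_toFinset, List.mem_filter] at hx
            exact hnl x hx.1 hx.2
          have hMmono : pvM G s ⊆ pvM G ((pvNeighbors4 p.1 p.2).foldl (pvAStep G t) (s, rest)).1 := by
            rw [c3]; exact Finset.subset_union_left
          have hfil : ∀ x, x ∈ pvNeighbors4 p.1 p.2 → pvElig G t x = true →
              x ∈ pvM G ((pvNeighbors4 p.1 p.2).foldl (pvAStep G t) (s, rest)).1 := by
            intro x h1 h2
            rw [c3]
            refine Finset.mem_union_right _ ?_
            rw [List.mem_toFinset, List.mem_filter]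
            exact ⟨h1, h2⟩
          apply ih
          · exact c1
          · exact c2
          · exact hMmono hs0
          · exact hMsub
          · intro x hx
            rcases c5 x hx with h | ⟨h1, h2⟩
            · exact hMmono (hstk x (by simp [h]))
            · exact hfil x h1 h2
          · intro m hm' hmn q hqn hqe
            by_cases hmp : m = p
            · subst hmp
              exact hfil q hqn hqe
            · have hmM : m ∈ pvM G s := by
                rw [c3, Finset.mem_union] at hm'
                rcases hm' with h | h
                · exact h
                · rw [List.mem_toFinset, List.mem_filter] at h
                  rcases c6 m h.1 h.2 with h2 | h2
                  · exact h2
                  · exact absurd h2 hmn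
              have hmrest : m ∉ rest := fun hr => hmn (c4 m hr)
              have hmstk : m ∉ p :: rest := by simp [hmp, hmrest]
              exact hMmono (hcl m hmM hmstk q hqn hqe)
          · have hb1 : (pvM G s).card ≤ (pvM G ((pvNeighbors4 p.1 p.2).foldl (pvAStep G t) (s, rest)).1).card :=
              Finset.card_le_card hMmono
            have hb2 : (pvM G ((pvNeighbors4 p.1 p.2).foldl (pvAStep G t) (s, rest)).1).card ≤ G.length * pvWd G := by
              rw [← pvCard_cells G]
              exact Finset.card_le_card (pvM_sub_cells G _)
            simp only [List.length_cons] at hm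
            omega

-- ===== B-side: the frontier-level saturation =====

def pvBStep (G : List (List Int)) (t H W : Int)
    (st : PySem.Set (Int × Int) × List (Int × Int)) (q : Int × Int) :
    PySem.Set (Int × Int) × List (Int × Int) :=
  if (0 ≤ q.1 ∧ q.1 < H ∧ 0 ≤ q.2 ∧ q.2 < W) ∧ ¬ q ∈ st.1 ∧
      (G.getD q.1.toNat []).getD q.2.toNat 0 = t
  then (PySem.Set.add st.1 q, st.2 ++ [q]) else st

theorem pvBfsRound_eq (G : List (List Int)) (t H W : Int)
    (st : PySem.Set (Int × Int) × List (Int × Int)) :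
    pvBfsRound G t H W st =
      if st.2.isEmpty then st
      else st.2.foldl (fun st2 p => (pvNeighbors4 p.1 p.2).foldl (pvBStep G t H W) st2)
        (st.1, ([] : List (Int × Int))) := rfl

theorem pvBStep_eq (G : List (List Int)) (t : Int)
    (st : PySem.Set (Int × Int) × List (Int × Int)) (q : Int × Int) :
    pvBStep G t (G.length : Int) ((pvWd G : Nat) : Int) st q =
      if pvElig G t q = true ∧ ¬ q ∈ st.1 then (PySem.Set.add st.1 q, st.2 ++ [q]) else st := by
  have hb := pvInBounds_iff G q.1 q.2
  simp only [pvBStep, pvElig, Bool.and_eq_true, decide_eq_true_eq, pvGridGet]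
  split_ifs with h1 h2 <;> first | rfl | (exfalso; tauto)

theorem pvFoldl_nested (G : List (List Int)) (t H W : Int) (fr : List (Int × Int)) :
    ∀ st2 : PySem.Set (Int × Int) × List (Int × Int),
    fr.foldl (fun st2 p => (pvNeighbors4 p.1 p.2).foldl (pvBStep G t H W) st2) st2
      = (fr.flatMap (fun p => pvNeighbors4 p.1 p.2)).foldl (pvBStep G t H W) st2 := by
  induction fr with
  | nil => intro st2; rfl
  | cons p fr' ih =>
      intro st2
      rw [List.foldl_cons, List.flatMap_cons, List.foldl_append, ih]

theorem pvFoldB (G : List (List Int)) (t : Int) :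
    ∀ (ql : List (Int × Int)) (cp : PySem.Set (Int × Int)) (nw : List (Int × Int)),
      (∀ x, x ∈ (ql.foldl (pvBStep G t (G.length : Int) ((pvWd G : Nat) : Int)) (cp, nw)).1 ↔
          x ∈ cp ∨ (x ∈ ql ∧ pvElig G t x = true)) ∧
      (∀ x ∈ (ql.foldl (pvBStep G t (G.length : Int) ((pvWd G : Nat) : Int)) (cp, nw)).1,
          x ∈ cp ∨ x ∈ (ql.foldl (pvBStep G t (G.length : Int) ((pvWd G : Nat) : Int)) (cp, nw)).2) ∧
      (∀ x ∈ (ql.foldl (pvBStep G t (G.length : Int) ((pvWd G : Nat) : Int)) (cp, nw)).2,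
          x ∈ nw ∨ x ∈ (ql.foldl (pvBStep G t (G.length : Int) ((pvWd G : Nat) : Int)) (cp, nw)).1) ∧
      (∀ x ∈ nw, x ∈ (ql.foldl (pvBStep G t (G.length : Int) ((pvWd G : Nat) : Int)) (cp, nw)).2) := by
  intro ql
  induction ql with
  | nil =>
      intro cp nw
      exact ⟨by simp, fun x hx => Or.inl hx, fun x hx => Or.inl hx, fun x hx => hx⟩
  | cons q ql' ih =>
      intro cp nw
      simp only [List.foldl_cons, pvBStep_eq]
      by_cases h : pvElig G t q = true ∧ ¬ q ∈ cp
      · rw [if_pos h]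
        obtain ⟨c1, c2, c3, c4⟩ := ih (PySem.Set.add cp q) (nw ++ [q])
        have hqfin : q ∈ (ql'.foldl (pvBStep G t (G.length : Int) ((pvWd G : Nat) : Int))
            (PySem.Set.add cp q, nw ++ [q])).2 := c4 q (by simp)
        have hqcp : q ∈ PySem.Set.add cp q := (PySem.Set.mem_add _ _ _).2 (Or.inr rfl)
        refine ⟨?_, ?_, ?_, ?_⟩
        · intro x
          rw [c1, PySem.Set.mem_add, List.mem_cons]
          constructor
          · rintro ((hx | rfl) | ⟨hx1, hx2⟩)
            · exact Or.inl hx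
            · exact Or.inr ⟨Or.inl rfl, h.1⟩
            · exact Or.inr ⟨Or.inr hx1, hx2⟩
          · rintro (hx | ⟨(rfl | hx1), hx2⟩)
            · exact Or.inl (Or.inl hx)
            · exact Or.inl (Or.inr rfl)
            · exact Or.inr ⟨hx1, hx2⟩
        · intro x hx
          rcases c2 x hx with h2 | h2
          · rcases (PySem.Set.mem_add _ _ _).1 h2 with h3 | h3
            · exact Or.inl h3
            · exact Or.inr (h3 ▸ hqfin)
          · exact Or.inr h2
        · intro x hx
          rcases c3 x hx with h2 | h2
          · rcases List.mem_append.1 h2 with h3 | h3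
            · exact Or.inl h3
            · have hx' : x = q := by simpa using h3
              subst hx'
              exact Or.inr ((c1 x).2 (Or.inl hqcp))
          · exact Or.inr h2
        · intro x hx
          exact c4 x (by simp [hx])
      · rw [if_neg h]
        obtain ⟨c1, c2, c3, c4⟩ := ih cp nw
        have hq : pvElig G t q = true → q ∈ cp := by tauto
        refine ⟨?_, c2, c3, c4⟩
        intro x
        rw [c1, List.mem_cons]
        constructor
        · rintro (hx | ⟨hx1, hx2⟩)
          · exact Or.inl hx
          · exact Or.inr ⟨Or.inr hx1, hx2⟩
        · rintro (hx | ⟨(rfl | hx1), hx2⟩)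
          · exact Or.inl hx
          · exact Or.inl (hq hx2)
          · exact Or.inr ⟨hx1, hx2⟩

theorem pvBRound (G : List (List Int)) (t : Int) (s0 : Int × Int) (n : Nat)
    (st : PySem.Set (Int × Int) × List (Int × Int))
    (h1 : ∀ x, x ∈ st.1 ↔ x ∈ (pvFset G t)^[n] {s0})
    (h2 : ∀ x ∈ st.2, x ∈ st.1)
    (h3 : ∀ q, pvElig G t q = true → (∃ p, p ∈ st.1 ∧ q ∈ pvNeighbors4 p.1 p.2) →
        q ∈ st.1 ∨ ∃ p ∈ st.2, q ∈ pvNeighbors4 p.1 p.2) :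
    (∀ x, x ∈ (pvBfsRound G t (G.length : Int) ((pvWd G : Nat) : Int) st).1 ↔
        x ∈ (pvFset G t)^[n + 1] {s0}) ∧
    (∀ x ∈ (pvBfsRound G t (G.length : Int) ((pvWd G : Nat) : Int) st).2,
        x ∈ (pvBfsRound G t (G.length : Int) ((pvWd G : Nat) : Int) st).1) ∧
    (∀ q, pvElig G t q = true →
        (∃ p, p ∈ (pvBfsRound G t (G.length : Int) ((pvWd G : Nat) : Int) st).1 ∧
          q ∈ pvNeighbors4 p.1 p.2) →
        q ∈ (pvBfsRound G t (G.length : Int) ((pvWd G : Nat) : Int) st).1 ∨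
          ∃ p ∈ (pvBfsRound G t (G.length : Int) ((pvWd G : Nat) : Int) st).2,
            q ∈ pvNeighbors4 p.1 p.2) := by
  rw [pvBfsRound_eq]
  by_cases hemp : st.2.isEmpty
  · rw [if_pos hemp]
    have hempty : st.2 = [] := List.isEmpty_iff.1 hemp
    have hstab : (pvFset G t)^[n + 1] {s0} = (pvFset G t)^[n] {s0} := by
      rw [Function.iterate_succ_apply']
      refine Finset.Subset.antisymm ?_ (pvF_infl G t _)
      intro x hx
      rw [pvMem_F] at hx
      rcases hx with hx | ⟨p, hp, hn, he⟩
      · exact hx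
      · rcases h3 x he ⟨p, (h1 p).2 hp, hn⟩ with h | ⟨p', hp', -⟩
        · exact (h1 x).1 h
        · rw [hempty] at hp'
          simp at hp'
    refine ⟨fun x => by rw [hstab]; exact h1 x, h2, h3⟩
  · rw [if_neg hemp, pvFoldl_nested]
    obtain ⟨c1, c2, c3, c4⟩ :=
      pvFoldB G t (st.2.flatMap (fun p => pvNeighbors4 p.1 p.2)) st.1 []
    have hiter : (pvFset G t)^[n + 1] {s0} = pvFset G t ((pvFset G t)^[n] {s0}) :=
      Function.iterate_succ_apply' _ _ _
    have g1 : ∀ x, x ∈ ((st.2.flatMap (fun p => pvNeighbors4 p.1 p.2)).foldl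
        (pvBStep G t (G.length : Int) ((pvWd G : Nat) : Int)) (st.1, [])).1 ↔
        x ∈ (pvFset G t)^[n + 1] {s0} := by
      intro x
      rw [c1, hiter, pvMem_F]
      constructor
      · rintro (hx | ⟨hx1, hx2⟩)
        · exact Or.inl ((h1 x).1 hx)
        · rcases List.mem_flatMap.1 hx1 with ⟨p, hp, hn⟩
          exact Or.inr ⟨p, (h1 p).1 (h2 p hp), hn, hx2⟩
      · rintro (hx | ⟨p, hp, hn, he⟩)
        · exact Or.inl ((h1 x).2 hx)
        · rcases h3 x he ⟨p, (h1 p).2 hp, hn⟩ with h | ⟨p', hp', hn'⟩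
          · exact Or.inl h
          · exact Or.inr ⟨List.mem_flatMap.2 ⟨p', hp', hn'⟩, he⟩
    refine ⟨g1, ?_, ?_⟩
    · intro x hx
      rcases c3 x hx with h | h
      · simp at h
      · exact h
    · intro q hqe ⟨p, hp, hn⟩
      rcases c2 p hp with h | h
      · left
        rw [g1 q, hiter, pvMem_F]
        exact Or.inr ⟨p, (h1 p).1 h, hn, hqe⟩
      · exact Or.inr ⟨p, h, hn⟩

theorem pvFoldl_range_iterate {α : Type} (g : α → α) :
    ∀ (n : Nat) (a : α), (List.range n).foldl (fun st _ => g st) a = g^[n] a := by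
  intro n
  induction n with
  | zero => intro a; rfl
  | succ n ih =>
      intro a
      rw [List.range_succ, List.foldl_append, ih, List.foldl_cons, List.foldl_nil,
        ← Function.iterate_succ_apply' g n a]

theorem pvBInv_all (G : List (List Int)) (t : Int) (s0 : Int × Int) :
    ∀ n : Nat,
      (∀ x, x ∈ ((pvBfsRound G t (G.length : Int) ((pvWd G : Nat) : Int))^[n] ([s0], [s0])).1 ↔
        x ∈ (pvFset G t)^[n] {s0}) ∧
      (∀ x ∈ ((pvBfsRound G t (G.length : Int) ((pvWd G : Nat) : Int))^[n] ([s0], [s0])).2,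
        x ∈ ((pvBfsRound G t (G.length : Int) ((pvWd G : Nat) : Int))^[n] ([s0], [s0])).1) ∧
      (∀ q, pvElig G t q = true →
        (∃ p, p ∈ ((pvBfsRound G t (G.length : Int) ((pvWd G : Nat) : Int))^[n] ([s0], [s0])).1 ∧
          q ∈ pvNeighbors4 p.1 p.2) →
        q ∈ ((pvBfsRound G t (G.length : Int) ((pvWd G : Nat) : Int))^[n] ([s0], [s0])).1 ∨
          ∃ p ∈ ((pvBfsRound G t (G.length : Int) ((pvWd G : Nat) : Int))^[n] ([s0], [s0])).2,
            q ∈ pvNeighbors4 p.1 p.2) := by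
  intro n
  induction n with
  | zero =>
      refine ⟨by simp, by simp, ?_⟩
      intro q hq ⟨p, hp, hn⟩
      right
      exact ⟨p, hp, hn⟩
  | succ n ih =>
      obtain ⟨h1, h2, h3⟩ := ih
      have := pvBRound G t s0 n _ h1 h2 h3
      rw [← Function.iterate_succ_apply' (pvBfsRound G t (G.length : Int) ((pvWd G : Nat) : Int))
        n (([s0], [s0]))] at this
      exact this

theorem pvSub_iter (G : List (List Int)) (t : Int) (S : Finset (Int × Int)) :
    ∀ k : Nat, S ⊆ (pvFset G t)^[k] S := by
  intro k
  induction k with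
  | zero => exact fun x hx => hx
  | succ k ih =>
      rw [Function.iterate_succ_apply']
      exact fun x hx => pvF_infl G t _ (ih hx)

theorem pvA_eq (G : List (List Int)) (r c : Int) :
    dsl_component_mask G r c =
      if pvInBounds G r c then
        pvDfsLoop G (pvGridGet G (r, c)) (2 * (G.length * pvWd G) + 2)
          (pvGridSet1 ((List.range G.length).map fun _ => List.replicate (pvWd G) (0 : Int)) (r, c))
          [(r, c)]
      else (List.range G.length).map fun _ => (List.range (pvWd G)).map fun _ => pvClamp 0 := by
  cases G <;> rfl

theorem pvAlt_eq (G : List (List Int)) (r c : Int) :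
    dsl_component_mask_alt G r c =
      if 0 ≤ r ∧ r < (G.length : Int) ∧ 0 ≤ c ∧ c < ((pvWd G : Nat) : Int) then
        (List.range G.length).map fun (i : Nat) => (List.range (pvWd G)).map fun (j : Nat) =>
          if ((i : Int), (j : Int)) ∈ ((List.range (G.length * pvWd G)).foldl
              (fun st _ => pvBfsRound G (pvGridGet G (r, c)) (G.length : Int)
                ((pvWd G : Nat) : Int) st)
              ([(r, c)], [(r, c)])).1 then (1 : Int) else 0
      else (List.range G.length).map fun _ => List.replicate (pvWd G) (0 : Int) := by
  cases G <;> rfl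

-- ===== VERDICT =====
theorem dsl_component_mask_spec : Claim_equal_dsl_component_mask := by
  unfold Claim_equal_dsl_component_mask Spec_dsl_component_mask
  intro G r c _ _
  rw [pvA_eq, pvAlt_eq]
  by_cases hb : pvInBounds G r c = true
  · rw [if_pos hb, if_pos ((pvInBounds_iff G r c).1 hb)]
    set t := pvGridGet G (r, c) with ht
    set s0 : Int × Int := (r, c) with hs0def
    set N := G.length * pvWd G with hN
    set R := (pvFset G t)^[N] ({s0} : Finset (Int × Int)) with hR
    have hs0cells : s0 ∈ pvCells G := (pvMem_cells G s0).2 hb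
    have hfix : pvFset G t R = R :=
      pvIter_fix G t (Finset.singleton_subset_iff.2 hs0cells) (Finset.singleton_nonempty s0)
    have hRsub : ∀ T : Finset (Int × Int), s0 ∈ T →
        (∀ p ∈ T, ∀ q ∈ pvNeighbors4 p.1 p.2, pvElig G t q = true → q ∈ T) → R ⊆ T :=
      fun T h0 hcl => pvIter_sub_closed G t s0 T h0 hcl N
    have hs0R : s0 ∈ R := pvSub_iter G t {s0} N (Finset.mem_singleton_self s0)
    -- the initial seen grid
    set seen0 := (List.range G.length).map (fun _ => List.replicate (pvWd G) (0 : Int)) with hseen0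
    have hg0 : pvGInv G seen0 := by
      constructor
      · simp [hseen0]
      · intro row hrow
        rcases List.mem_map.1 hrow with ⟨_, _, rfl⟩
        simp
    have h010 : pvE01 seen0 := by
      intro row hrow x hx
      rcases List.mem_map.1 hrow with ⟨_, _, rfl⟩
      exact Or.inl (List.eq_of_mem_replicate hx)
    have hget0 : ∀ p ∈ pvCells G, pvGridGet seen0 p = 0 := by
      intro p hp
      obtain ⟨hp1, hp2, hp3, hp4⟩ := pvCells_coords hp
      have hpl : p.1.toNat < seen0.length := by rw [hg0.1]; exact hp2
      have hrow : seen0[p.1.toNat]'hpl = List.replicate (pvWd G) (0 : Int) := by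
        simp [hseen0]
      unfold pvGridGet
      rw [List.getD_eq_getElem _ _ hpl, hrow,
        List.getD_eq_getElem _ _ (by simpa using hp4), List.getElem_replicate]
    have hM0 : pvM G seen0 = ∅ := by
      rw [pvM, Finset.filter_eq_empty_iff]
      intro p hp
      rw [hget0 p hp]
      norm_num
    have hs0len : s0.1.toNat < seen0.length := by
      rw [hg0.1]; exact (pvCells_coords hs0cells).2.1
    have hM1 : pvM G (pvGridSet1 seen0 s0) = {s0} := by
      rw [pvM_set1 hg0 hs0cells, hM0]
      rfl
    have hs0M : s0 ∈ pvM G (pvGridSet1 seen0 s0) := by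
      rw [hM1]; exact Finset.mem_singleton_self s0
    obtain ⟨hgF, h01F, hMF⟩ :=
      pvDfsRun G t R s0 hfix hRsub (2 * N + 2) (pvGridSet1 seen0 s0) [s0]
        (pvGInv_set1 hg0 hs0len) (pvE01_set1 h010 hs0len) hs0M
        (by rw [hM1]; exact Finset.singleton_subset_iff.2 hs0R)
        (by
          intro p hp
          rw [List.mem_singleton] at hp
          exact hp ▸ hs0M)
        (by
          intro p hpM hpn
          rw [hM1, Finset.mem_singleton] at hpM
          exact absurd (by simp [hpM]) hpn)
        (by
          rw [hM1, Finset.card_singleton]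
          simp only [List.length_cons, List.length_nil]
          omega)
    -- B side: turn the round fold into an iterate and use the invariant
    rw [pvFoldl_range_iterate]
    obtain ⟨hB1, hB2, hB3⟩ := pvBInv_all G t s0 N
    -- the two grids are equal entry by entry
    apply List.ext_getElem
    · rw [hgF.1]; simp
    · intro i h1 h2
      rw [List.getElem_map, List.getElem_range]
      apply List.ext_getElem
      · rw [hgF.2 _ (List.getElem_mem h1)]; simp
      · intro j hj1 hj2
        rw [List.getElem_map, List.getElem_range]
        have hi : i < G.length := by rw [← hgF.1]; exact h1
        have hjw : j < pvWd G := by rw [← hgF.2 _ (List.getElem_mem h1)]; exact hj1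
        have hcell : ((i : Int), (j : Int)) ∈ pvCells G := by
          rw [pvMem_cells, pvInBounds_iff]
          refine ⟨by omega, by omega, by omega, by omega⟩
        have hgg : pvGridGet (pvDfsLoop G t (2 * N + 2) (pvGridSet1 seen0 s0) [s0])
            ((i : Int), (j : Int)) =
            (pvDfsLoop G t (2 * N + 2) (pvGridSet1 seen0 s0) [s0])[i][j] := by
          unfold pvGridGet
          simp only [Int.toNat_natCast]
          rw [List.getD_eq_getElem _ _ h1, List.getD_eq_getElem _ _ hj1]
        have hmemR : (pvDfsLoop G t (2 * N + 2) (pvGridSet1 seen0 s0) [s0])[i][j] = 1 ↔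
            ((i : Int), (j : Int)) ∈ R := by
          rw [← hgg, ← hMF]
          constructor
          · intro h
            exact pvMem_M.2 ⟨hcell, h⟩
          · intro h
            exact (pvMem_M.1 h).2
        rcases pvGet01 hgF h01F hcell with h0 | h0
        · rw [hgg] at h0
          rw [h0, if_neg]
          intro hmem
          have := hmemR.2 ((hB1 _).1 hmem)
          omega
        · rw [hgg] at h0
          rw [h0, if_pos ((hB1 _).2 (hmemR.1 h0))]
  · rw [if_neg hb, if_neg (fun h => hb ((pvInBounds_iff G r c).2 h))]
    simp [List.map_const', pvClamp]
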